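-- pv_equiv track=rewrite | github.com/EnGardeHQ/Onside | src/utils/schema_validator.py | _types_compatible
-- ===== SOURCE A (Python) =====
-- def _types_compatible(expected_type: str, actual_type: str) -> bool:
--     """
--     Check if two column types are compatible.
--
--     This is a simplified check that normalizes common type variations.
--     """
--     # Normalize types for comparison
--     expected_type = expected_type.lower()
--     actual_type = actual_type.lower()
--
--     # Direct match
--     if expected_type == actual_type:
--         return True
--
--     # Common compatible types
--     compatible_types = {
--         "integer": ["int", "int4", "integer"],
--         "bigint": ["int8", "bigint"],
--         "text": ["text", "varchar", "character varying"],
--         "boolean": ["bool", "boolean"],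
--         "timestamp": ["timestamp", "timestamp without time zone", "timestamp with time zone",
--                       "timestamptz"],
--         "float": ["float", "float8", "double precision", "real"]
--     }
--
--     for type_group, variations in compatible_types.items():
--         if expected_type in variations and actual_type in variations:
--             return True
--
--     return False
-- ===== SOURCE B (Python) =====
-- _GROUPS = {
--     "integer": ["int", "int4", "integer"],
--     "bigint": ["int8", "bigint"],
--     "text": ["text", "varchar", "character varying"],
--     "boolean": ["bool", "boolean"],
--     "timestamp": ["timestamp", "timestamp without time zone", "timestamp with time zone",
--                   "timestamptz"],
--     "float": ["float", "float8", "double precision", "real"],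
-- }
--
-- # Flat index: each variation string -> its group name.
-- _INDEX = {v: g for g, vs in _GROUPS.items() for v in vs}
--
--
-- def _types_compatible(expected_type: str, actual_type: str) -> bool:
--     """Check if two column types are compatible (flat-index lookup version)."""
--     expected_type = expected_type.lower()
--     actual_type = actual_type.lower()
--     if expected_type == actual_type:
--         return True
--     group = _INDEX.get(expected_type)
--     return group is not None and group == _INDEX.get(actual_type)
-- ===== Notes on version B (the rewrite author's own statement) =====
-- stated objective: idiomatic
-- what changed: Replaces the per-call loop over type groups (with two membership scans per group) by a flat variation->group dict built once at module level; after the direct-equality short-circuit, compatibility is two O(1) lookups compared for the same group name.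
import Mathlib
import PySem

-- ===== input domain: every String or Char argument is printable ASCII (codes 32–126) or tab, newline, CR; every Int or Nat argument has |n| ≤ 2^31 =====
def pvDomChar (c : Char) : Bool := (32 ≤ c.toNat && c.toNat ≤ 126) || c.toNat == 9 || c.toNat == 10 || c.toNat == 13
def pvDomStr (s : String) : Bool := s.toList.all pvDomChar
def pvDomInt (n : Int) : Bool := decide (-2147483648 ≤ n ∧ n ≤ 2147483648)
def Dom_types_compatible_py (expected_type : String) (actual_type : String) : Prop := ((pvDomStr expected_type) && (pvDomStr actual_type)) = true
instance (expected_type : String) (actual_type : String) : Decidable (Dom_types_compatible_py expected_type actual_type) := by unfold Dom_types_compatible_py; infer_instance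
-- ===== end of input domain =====

-- B replaces A's per-call loop over type groups by a flat variation→group index built once; two lookups replace the group scans.

-- ===== PORT A =====
-- A's literal compatible_types table (dict iterated in insertion order).
def pvGroupsA : List (String × List String) :=
  [("integer", ["int", "int4", "integer"]),
   ("bigint", ["int8", "bigint"]),
   ("text", ["text", "varchar", "character varying"]),
   ("boolean", ["bool", "boolean"]),
   ("timestamp", ["timestamp", "timestamp without time zone", "timestamp with time zone",
                  "timestamptz"]),
   ("float", ["float", "float8", "double precision", "real"])]

-- the 'for type_group, variations in compatible_types.items():' loop with its early return
def typesLoopA (e a : String) : List (String × List String) → Bool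
  | [] => false
  | (_, vs) :: rest => if vs.contains e && vs.contains a then true else typesLoopA e a rest

def types_compatible_py (expected_type : String) (actual_type : String) : Bool :=
  let e := PySem.Str.lower expected_type
  let a := PySem.Str.lower actual_type
  if e = a then true
  else typesLoopA e a pvGroupsA

-- ===== PORT B =====
-- module-level flat index: {v: g for g, vs in _GROUPS.items() for v in vs}
def pvIndexB : PySem.Dict String String :=
  pvGroupsA.foldl (fun d gv => gv.2.foldl (fun d v => d.insert v gv.1) d) PySem.Dict.empty

def types_compatible_py_alt (expected_type : String) (actual_type : String) : Bool :=
  let e := PySem.Str.lower expected_type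
  let a := PySem.Str.lower actual_type
  if e = a then true
  else
    match pvIndexB.get? e with
    | none => false
    | some g => pvIndexB.get? a == some g

-- ===== PRECONDITION & SPEC =====
def Spec_types_compatible_py (expected_type : String) (actual_type : String) (out : Bool) : Prop := out = types_compatible_py_alt expected_type actual_type
instance (expected_type : String) (actual_type : String) (out : Bool) : Decidable (Spec_types_compatible_py expected_type actual_type out) := by unfold Spec_types_compatible_py; infer_instance

-- ===== CLAIM (what is proved, stated in full; the proofs are below) =====
def Claim_equal_types_compatible_py : Prop := ∀ (expected_type : String) (actual_type : String), Dom_types_compatible_py expected_type actual_type → Spec_types_compatible_py expected_type actual_type (types_compatible_py expected_type actual_type)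

-- ===== LEMMAS AND PROOFS =====
-- all variation strings appearing in the table
def pvAllVars : List String :=
  ["int", "int4", "integer", "int8", "bigint", "text", "varchar", "character varying",
   "bool", "boolean", "timestamp", "timestamp without time zone", "timestamp with time zone",
   "timestamptz", "float", "float8", "double precision", "real"]

lemma pvIndexB_eq : pvIndexB = PySem.Dict.mk
    [("int", "integer"), ("int4", "integer"), ("integer", "integer"),
     ("int8", "bigint"), ("bigint", "bigint"),
     ("text", "text"), ("varchar", "text"), ("character varying", "text"),
     ("bool", "boolean"), ("boolean", "boolean"),
     ("timestamp", "timestamp"), ("timestamp without time zone", "timestamp"),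
     ("timestamp with time zone", "timestamp"), ("timestamptz", "timestamp"),
     ("float", "float"), ("float8", "float"),
     ("double precision", "float"), ("real", "float")] := by decide

lemma get?_of_not_mem (s : String) (h : s ∉ pvAllVars) : pvIndexB.get? s = none := by
  simp only [pvAllVars, List.mem_cons, List.not_mem_nil, or_false, not_or] at h
  obtain ⟨h1, h2, h3, h4, h5, h6, h7, h8, h9, h10, h11, h12, h13, h14, h15, h16, h17, h18⟩ := h
  rw [pvIndexB_eq]
  simp [PySem.Dict.get?,
    Ne.symm h1, Ne.symm h2, Ne.symm h3, Ne.symm h4, Ne.symm h5, Ne.symm h6,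
    Ne.symm h7, Ne.symm h8, Ne.symm h9, Ne.symm h10, Ne.symm h11, Ne.symm h12,
    Ne.symm h13, Ne.symm h14, Ne.symm h15, Ne.symm h16, Ne.symm h17, Ne.symm h18]

lemma loopA_left_not_mem (x y : String) (h : x ∉ pvAllVars) :
    typesLoopA x y pvGroupsA = false := by
  simp only [pvAllVars, List.mem_cons, List.not_mem_nil, or_false, not_or] at h
  obtain ⟨h1, h2, h3, h4, h5, h6, h7, h8, h9, h10, h11, h12, h13, h14, h15, h16, h17, h18⟩ := h
  simp [pvGroupsA, typesLoopA, h1, h2, h3, h4, h5, h6, h7, h8, h9, h10, h11, h12, h13, h14,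
    h15, h16, h17, h18]

lemma loopA_right_not_mem (x y : String) (h : y ∉ pvAllVars) :
    typesLoopA x y pvGroupsA = false := by
  simp only [pvAllVars, List.mem_cons, List.not_mem_nil, or_false, not_or] at h
  obtain ⟨h1, h2, h3, h4, h5, h6, h7, h8, h9, h10, h11, h12, h13, h14, h15, h16, h17, h18⟩ := h
  simp [pvGroupsA, typesLoopA, h1, h2, h3, h4, h5, h6, h7, h8, h9, h10, h11, h12, h13, h14,
    h15, h16, h17, h18]

set_option maxHeartbeats 4000000 in
lemma table_eq (x y : String) :
    typesLoopA x y pvGroupsA =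
      (match pvIndexB.get? x with
       | none => false
       | some g => pvIndexB.get? y == some g) := by
  by_cases hx : x ∈ pvAllVars
  · by_cases hy : y ∈ pvAllVars
    · fin_cases hx <;> fin_cases hy <;> decide
    · rw [loopA_right_not_mem x y hy, get?_of_not_mem y hy]
      cases pvIndexB.get? x <;> rfl
  · rw [loopA_left_not_mem x y hx, get?_of_not_mem x hx]

-- ===== VERDICT (by name: the statement is the Claim_ definition above) =====
theorem types_compatible_py_spec : Claim_equal_types_compatible_py := by
  intro e a _
  unfold Spec_types_compatible_py types_compatible_py types_compatible_py_alt
  by_cases h : PySem.Str.lower e = PySem.Str.lower a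
  · simp [h]
  · simp only [h, if_false]
    exact table_eq _ _
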